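-- pv_equiv track=rewrite | github.com/NeuralBlitz/fishstick | fishstick/knowledge_graph/schema.py | _infer_relation_signatures
-- ===== SOURCE A (Python) =====
-- from typing import Dict, List, Set, Optional, Tuple, Any, Callable
-- from collections import defaultdict
--
-- def _infer_relation_signatures(
--
--     entities: Dict[str, str],
--     triplets: List[Tuple[str, str, str]],
-- ) -> Dict[str, Tuple[str, str]]:
--     """Infer relation domain and range types."""
--     relation_domains: Dict[str, Set[str]] = defaultdict(set)
--     relation_ranges: Dict[str, Set[str]] = defaultdict(set)
--
--     for s, p, o in triplets:
--         if s in entities: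
--             relation_domains[p].add(entities[s])
--         if o in entities:
--             relation_ranges[p].add(entities[o])
--
--     signatures = {}
--
--     for rel in relation_domains:
--         domains = relation_domains[rel]
--         ranges = relation_ranges[rel]
--
--         if domains and ranges:
--             domain_type = list(domains)[0] if len(domains) == 1 else "entity"
--             range_type = list(ranges)[0] if len(ranges) == 1 else "entity"
--
--             signatures[rel] = (domain_type, range_type)
--
--     return signatures
-- ===== SOURCE B (Python) =====
-- def _infer_relation_signatures(entities, triplets):
--     # Single pass: per relation keep a collapse marker (first type seen;
--     # promoted to "entity" once a different type appears) for domain and range.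
--     dom = {}
--     rng = {}
--     for s, p, o in triplets:
--         t = entities.get(s)
--         if t is not None:
--             cur = dom.get(p)
--             if cur is None:
--                 dom[p] = t
--             elif cur != t:
--                 dom[p] = "entity"
--         t = entities.get(o)
--         if t is not None:
--             cur = rng.get(p)
--             if cur is None:
--                 rng[p] = t
--             elif cur != t:
--                 rng[p] = "entity"
--     return {p: (d, rng[p]) for p, d in dom.items() if p in rng}
-- ===== Notes on version B (the rewrite author's own statement) =====
-- stated objective: simpler
-- what changed: Replaces the two per-relation type sets and the post-pass len(...)==1 collapse with a single pass that keeps one collapse marker (first type seen, promoted to 'entity' on conflict) per relation, and emits the markers directly for relations seen in both positions.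
import Mathlib
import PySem

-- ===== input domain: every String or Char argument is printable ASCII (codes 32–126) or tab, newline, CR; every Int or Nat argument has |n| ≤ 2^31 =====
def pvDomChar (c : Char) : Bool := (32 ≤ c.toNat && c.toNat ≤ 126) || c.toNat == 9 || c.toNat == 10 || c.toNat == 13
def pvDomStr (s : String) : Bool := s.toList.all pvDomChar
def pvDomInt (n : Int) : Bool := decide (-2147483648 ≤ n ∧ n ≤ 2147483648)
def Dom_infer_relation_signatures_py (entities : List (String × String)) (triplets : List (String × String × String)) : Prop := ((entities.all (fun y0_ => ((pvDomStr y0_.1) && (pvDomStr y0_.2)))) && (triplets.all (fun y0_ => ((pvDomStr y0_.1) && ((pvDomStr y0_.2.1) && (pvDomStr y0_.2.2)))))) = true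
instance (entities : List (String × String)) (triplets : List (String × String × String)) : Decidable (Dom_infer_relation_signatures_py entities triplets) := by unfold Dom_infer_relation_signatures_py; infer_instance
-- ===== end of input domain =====

-- B replaces A's per-relation type SETS plus a len(...)==1 post-pass by a single
-- pass keeping one collapse marker per relation (simpler decomposition, same cost).


-- ===== PORT A =====
-- 's in entities' / 'entities[s]': first-match lookup in the association list
def pvEntGet (entities : List (String × String)) (s : String) : Option String :=
  (entities.find? (fun p => p.1 == s)).map (fun p => p.2)

-- the loop body: both defaultdict(set) updates for one triplet (s, p, o)
def pvStepA (entities : List (String × String))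
    (st : PySem.Dict String (PySem.Set String) × PySem.Dict String (PySem.Set String))
    (t : String × String × String) :
    PySem.Dict String (PySem.Set String) × PySem.Dict String (PySem.Set String) :=
  let st1 := match pvEntGet entities t.1 with
    | some ty => (st.1.modify t.2.1 [] (fun S => PySem.Set.add S ty), st.2)
    | none => st
  match pvEntGet entities t.2.2 with
  | some ty => (st1.1, st1.2.modify t.2.1 [] (fun S => PySem.Set.add S ty))
  | none => st1

def infer_relation_signatures_py (entities : List (String × String)) (triplets : List (String × String × String)) : List (String × String × String) :=
  let st := triplets.foldl (pvStepA entities) (PySem.Dict.empty, PySem.Dict.empty)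
  -- second phase: for rel in relation_domains; 'if domains and ranges' = both nonempty;
  -- list(domains)[0] is read only when the set has exactly one element, so it is its head
  st.1.items.foldl (fun sig kv =>
    let ranges := st.2.getD kv.1 []
    if kv.2 ≠ [] ∧ ranges ≠ [] then
      sig ++ [(kv.1,
        (if kv.2.length = 1 then kv.2.headD "" else "entity"),
        (if ranges.length = 1 then ranges.headD "" else "entity"))]
    else sig) []

-- ===== PORT B =====
-- one marker update: first type seen is stored, a different later type promotes to "entity"
def pvStepMark (d : PySem.Dict String String) (p ty : String) : PySem.Dict String String :=
  match d.get? p with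
  | none => d.insert p ty
  | some cur => if cur = ty then d else d.insert p "entity"

def pvStepB (entities : List (String × String))
    (st : PySem.Dict String String × PySem.Dict String String)
    (t : String × String × String) :
    PySem.Dict String String × PySem.Dict String String :=
  let st1 := match pvEntGet entities t.1 with
    | some ty => (pvStepMark st.1 t.2.1 ty, st.2)
    | none => st
  match pvEntGet entities t.2.2 with
  | some ty => (st1.1, pvStepMark st1.2 t.2.1 ty)
  | none => st1

def infer_relation_signatures_py_alt (entities : List (String × String)) (triplets : List (String × String × String)) : List (String × String × String) :=
  let st := triplets.foldl (pvStepB entities) (PySem.Dict.empty, PySem.Dict.empty)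
  st.1.items.foldl (fun out kv =>
    match st.2.get? kv.1 with
    | some r => out ++ [(kv.1, kv.2, r)]
    | none => out) []

-- ===== PRECONDITION & SPEC =====
def Spec_infer_relation_signatures_py (entities : List (String × String)) (triplets : List (String × String × String)) (out : List (String × String × String)) : Prop := out = infer_relation_signatures_py_alt entities triplets
instance (entities : List (String × String)) (triplets : List (String × String × String)) (out : List (String × String × String)) : Decidable (Spec_infer_relation_signatures_py entities triplets out) := by unfold Spec_infer_relation_signatures_py; infer_instance

-- ===== CLAIM (what is proved, stated in full; the proofs are below) =====
def Claim_equal_infer_relation_signatures_py : Prop := ∀ (entities : List (String × String)) (triplets : List (String × String × String)), Dom_infer_relation_signatures_py entities triplets → Spec_infer_relation_signatures_py entities triplets (infer_relation_signatures_py entities triplets)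

-- ===== LEMMAS AND PROOFS =====

-- collapse of a nonempty type set = B's marker for it
def pvCollapse (S : List String) : String :=
  if S.length = 1 then S.headD "" else "entity"

def pvF (kv : String × PySem.Set String) : String × String := (kv.1, pvCollapse kv.2)

-- the invariant tying A's set-valued dict to B's marker dict
def pvRel (dA : PySem.Dict String (PySem.Set String)) (dB : PySem.Dict String String) : Prop :=
  dB.items = dA.items.map pvF ∧ (∀ kv ∈ dA.items, kv.2 ≠ []) ∧ dA.keys.Nodup

theorem pvRel_get? {dA : PySem.Dict String (PySem.Set String)} {dB : PySem.Dict String String}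
    (h : pvRel dA dB) (p : String) : dB.get? p = (dA.get? p).map pvCollapse := by
  rcases h with ⟨hitems, -, -⟩
  simp only [PySem.Dict.get?, hitems, List.find?_map]
  have hpred : ((fun q : String × String => q.1 == p) ∘ pvF)
      = (fun kv : String × PySem.Set String => kv.1 == p) := rfl
  rw [hpred, Option.map_map, Option.map_map]
  rfl

theorem pvCollapse_add {S : List String} (hS : S ≠ []) (ty : String) :
    pvCollapse (PySem.Set.add S ty) =
      (if pvCollapse S = ty then pvCollapse S else "entity") := by
  match S, hS with
  | [x], _ =>
    by_cases hxy : x = ty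
    · subst hxy
      simp [PySem.Set.add, PySem.Set.contains, pvCollapse]
    · have hadd : PySem.Set.add [x] ty = [x, ty] := by
        simp [PySem.Set.add, PySem.Set.contains]
        exact fun h => hxy h.symm
      rw [hadd]
      simp [pvCollapse, hxy]
  | x :: y :: rest, _ =>
    have h2 : pvCollapse (x :: y :: rest) = "entity" := by
      simp [pvCollapse]
    rw [h2]
    simp only [PySem.Set.add]
    split
    · rw [h2]; split <;> rfl
    · have : pvCollapse (x :: y :: rest ++ [ty]) = "entity" := by
        simp [pvCollapse]
      rw [this]; split <;> rfl

theorem pvSet_add_ne_nil (S : PySem.Set String) (ty : String) : PySem.Set.add S ty ≠ [] := by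
  simp only [PySem.Set.add]
  split
  · rename_i h
    cases S
    · simp [PySem.Set.contains] at h
    · simp
  · simp

theorem pvRel_step {dA : PySem.Dict String (PySem.Set String)} {dB : PySem.Dict String String}
    (h : pvRel dA dB) (p ty : String) :
    pvRel (dA.modify p [] (fun S => PySem.Set.add S ty)) (pvStepMark dB p ty) := by
  obtain ⟨hitems, hne, hnd⟩ := h
  have hget : dB.get? p = (dA.get? p).map pvCollapse := pvRel_get? ⟨hitems, hne, hnd⟩ p
  have hcont : dB.contains p = dA.contains p := by
    simp only [PySem.Dict.contains, hitems, List.any_map]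
    rfl
  have hndA' : ∀ (v : PySem.Set String), ((dA.insert p v).keys).Nodup :=
    fun v => PySem.Dict.nodup_keys_insert dA p v hnd
  simp only [PySem.Dict.modify, pvStepMark, hget]
  cases hA : dA.get? p with
  | none =>
    have hcA : dA.contains p = false := by
      rw [PySem.Dict.contains_eq_isSome_get?, hA]; rfl
    have hcB : dB.contains p = false := by rw [hcont]; exact hcA
    have hgd : dA.getD p [] = [] := by simp [PySem.Dict.getD, hA]
    have hitemsA' : (dA.insert p (PySem.Set.add [] ty)).items = dA.items ++ [(p, PySem.Set.add [] ty)] :=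
      PySem.Dict.items_insert_of_not_contains dA _ hcA
    have hitemsB' : (dB.insert p ty).items = dB.items ++ [(p, ty)] :=
      PySem.Dict.items_insert_of_not_contains dB _ hcB
    rw [hgd]
    simp only [Option.map_none]
    refine ⟨?_, ?_, hndA' _⟩
    · rw [hitemsB', hitemsA', List.map_append, hitems]
      simp [pvF, pvCollapse, PySem.Set.add, PySem.Set.contains]
    · intro kv hkv
      rw [hitemsA'] at hkv
      rcases List.mem_append.mp hkv with h1 | h1
      · exact hne kv h1
      · simp only [List.mem_singleton] at h1
        rw [h1]
        exact pvSet_add_ne_nil [] ty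
  | some S =>
    have hmem : (p, S) ∈ dA.items := PySem.Dict.mem_items_of_get?_eq_some dA hA
    have hSne : S ≠ [] := hne _ hmem
    have hcA : dA.contains p = true := by
      rw [PySem.Dict.contains_eq_isSome_get?, hA]; rfl
    have hgd : dA.getD p [] = S := by simp [PySem.Dict.getD, hA]
    have hval : ∀ kv ∈ dA.items, kv.1 = p → kv.2 = S := by
      intro kv hkv hk
      have hmem' : (p, kv.2) ∈ dA.items := by
        rw [← hk]; exact hkv
      have := PySem.Dict.get?_of_mem_items dA hmem' hnd
      rw [hA] at this
      exact (Option.some.injEq _ _).mp this.symm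
    have hcol := pvCollapse_add hSne ty
    have hitemsA' : (dA.insert p (PySem.Set.add S ty)).items
        = dA.items.map (fun q => if q.1 == p then (p, PySem.Set.add S ty) else q) :=
      PySem.Dict.items_insert_of_contains dA _ hcA
    have hne' : ∀ kv ∈ dA.items.map (fun q => if q.1 == p then (p, PySem.Set.add S ty) else q),
        kv.2 ≠ [] := by
      intro kv hkv
      rcases List.mem_map.mp hkv with ⟨q, hq, hmap⟩
      by_cases hk : q.1 = p
      · simp only [hk, beq_self_eq_true, if_pos] at hmap
        rw [← hmap]
        exact pvSet_add_ne_nil S ty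
      · have hbe : (q.1 == p) = false := by simpa using hk
        simp only [hbe, Bool.false_eq_true, if_false] at hmap
        rw [← hmap]
        exact hne _ hq
    rw [hgd]
    simp only [Option.map_some]
    by_cases hcur : pvCollapse S = ty
    · rw [if_pos hcur]
      refine ⟨?_, ?_, hndA' _⟩
      · rw [hitemsA', List.map_map, hitems]
        apply (List.map_congr_left ?_).symm
        intro q hq
        by_cases hk : q.1 = p
        · have hq2 : q.2 = S := hval q hq hk
          simp only [Function.comp, hk, beq_self_eq_true, if_pos, pvF, hq2]
          rw [hcol, if_pos hcur]
        · simp [Function.comp, hk, pvF]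
      · rw [hitemsA']
        exact hne'
    · rw [if_neg hcur]
      have hcB : dB.contains p = true := by rw [hcont]; exact hcA
      have hitemsB' : (dB.insert p "entity").items
          = dB.items.map (fun q => if q.1 == p then (p, "entity") else q) :=
        PySem.Dict.items_insert_of_contains dB _ hcB
      refine ⟨?_, ?_, hndA' _⟩
      · rw [hitemsB', hitems, List.map_map, hitemsA', List.map_map]
        apply List.map_congr_left
        intro q hq
        by_cases hk : q.1 = p
        · have hq2 : q.2 = S := hval q hq hk
          simp only [Function.comp, pvF, hk, beq_self_eq_true, if_pos]
          rw [hcol, if_neg hcur]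
        · simp [Function.comp, hk, pvF]
      · rw [hitemsA']
        exact hne'

def pvRel2 (stA : PySem.Dict String (PySem.Set String) × PySem.Dict String (PySem.Set String))
    (stB : PySem.Dict String String × PySem.Dict String String) : Prop :=
  pvRel stA.1 stB.1 ∧ pvRel stA.2 stB.2

theorem pvRel2_step (entities : List (String × String)) (t : String × String × String)
    {stA stB} (h : pvRel2 stA stB) :
    pvRel2 (pvStepA entities stA t) (pvStepB entities stB t) := by
  obtain ⟨h1, h2⟩ := h
  simp only [pvStepA, pvStepB]
  cases pvEntGet entities t.1 with
  | none =>
    cases pvEntGet entities t.2.2 with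
    | none => exact ⟨h1, h2⟩
    | some ty => exact ⟨h1, pvRel_step h2 t.2.1 ty⟩
  | some ty =>
    cases pvEntGet entities t.2.2 with
    | none => exact ⟨pvRel_step h1 t.2.1 ty, h2⟩
    | some ty2 => exact ⟨pvRel_step h1 t.2.1 ty, pvRel_step h2 t.2.1 ty2⟩

theorem pvRel2_foldl (entities : List (String × String)) (triplets : List (String × String × String))
    {stA stB} (h : pvRel2 stA stB) :
    pvRel2 (triplets.foldl (pvStepA entities) stA) (triplets.foldl (pvStepB entities) stB) := by
  induction triplets generalizing stA stB with
  | nil => exact h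
  | cons t ts ih => exact ih (pvRel2_step entities t h)

theorem pvPhase2 {rA : PySem.Dict String (PySem.Set String)} {rB : PySem.Dict String String}
    (hR : pvRel rA rB)
    (lA : List (String × PySem.Set String)) (hlne : ∀ kv ∈ lA, kv.2 ≠ [])
    (acc : List (String × String × String)) :
    lA.foldl (fun sig kv =>
      let ranges := rA.getD kv.1 []
      if kv.2 ≠ [] ∧ ranges ≠ [] then
        sig ++ [(kv.1,
          (if kv.2.length = 1 then kv.2.headD "" else "entity"),
          (if ranges.length = 1 then ranges.headD "" else "entity"))]
      else sig) acc
    = (lA.map pvF).foldl (fun out kv =>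
        match rB.get? kv.1 with
        | some r => out ++ [(kv.1, kv.2, r)]
        | none => out) acc := by
  induction lA generalizing acc with
  | nil => rfl
  | cons kv rest ih =>
    have hSne : kv.2 ≠ [] := hlne kv (List.mem_cons_self)
    have hgB : rB.get? kv.1 = (rA.get? kv.1).map pvCollapse := pvRel_get? hR kv.1
    simp only [List.foldl_cons, List.map_cons]
    rw [ih (fun q hq => hlne q (List.mem_cons_of_mem _ hq))]
    congr 1
    cases hA : rA.get? kv.1 with
    | none =>
      have : rA.getD kv.1 [] = [] := by simp [PySem.Dict.getD, hA]
      simp [pvF, this, hgB, hA]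
    | some R =>
      have hRmem : (kv.1, R) ∈ rA.items := PySem.Dict.mem_items_of_get?_eq_some rA hA
      have hRne : R ≠ [] := hR.2.1 _ hRmem
      have hgd : rA.getD kv.1 [] = R := by simp [PySem.Dict.getD, hA]
      simp only [hgd]
      have h1 : (pvF kv).1 = kv.1 := rfl
      have h2 : (pvF kv).2 = pvCollapse kv.2 := rfl
      rw [if_pos ⟨hSne, hRne⟩, h1, h2, hgB, hA]
      simp [pvCollapse]

-- ===== VERDICT (by name: the statement is the Claim_ definition above) =====
theorem infer_relation_signatures_py_spec : Claim_equal_infer_relation_signatures_py := by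
  intro entities triplets _
  unfold Spec_infer_relation_signatures_py
  unfold infer_relation_signatures_py infer_relation_signatures_py_alt
  have hinit : pvRel2 (PySem.Dict.empty, PySem.Dict.empty) (PySem.Dict.empty, PySem.Dict.empty) := by
    constructor <;>
      exact ⟨rfl, by intro kv h; simp [PySem.Dict.empty] at h, by
        rw [PySem.Dict.keys_empty]; exact List.nodup_nil⟩
  have hfold := pvRel2_foldl entities triplets hinit
  obtain ⟨hdom, hrng⟩ := hfold
  have := pvPhase2 hrng (triplets.foldl (pvStepA entities) (PySem.Dict.empty, PySem.Dict.empty)).1.items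
    hdom.2.1 []
  rw [this, ← hdom.1]
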